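/-
  THE VOCABULARY OF A FUNCTION CONTRACT over the flat user machine, System V AMD64 ABI.

      Code               the code of the image: a byte list at a base address; `C.In mem`: it is in memory
      Conv               what is the same for every function of one program: its code, the stack region, the invariant of
                         every function boundary (`inv`; its ABI part is `abiInv`: direction flag clear, MXCSR masks set)
      Spec               what is particular to one function: `pre` (of the entry state: arguments in rdi rsi rdx rcx r8 r9 /
                         xmm0 …, memory), `post` (of the entry state and the return state: rax / xmm0, memory), the stack
                         bytes it uses (`frame`) and the memory windows it may write besides (`writes`)
      AtEntry K entry frame ret u
                         `u` is at the first instruction of a function that was CALLED: rip = entry, the return address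
                         `ret` at [rsp] and below 1 GB (`ret_lt`: executing `ret` needs a canonical target), rsp ≡ 0 (mod 8),
                         room for `frame` bytes of stack below, the code in memory, `K.inv`
      Returned K s u ret v
                         `v` is the state after the function's `ret`, for the entry state `u`: rip = ret, rsp = u.rsp + 8, the
                         callee-saved registers rbx rbp r12–r15 kept, memory the same outside [u.rsp - frame, u.rsp) and the
                         declared windows, the code still in memory, `K.inv`, and `s.post u v`
      Calls L μ I K entry s
                         THE CONTRACT: from every state at the entry that satisfies the precondition, the machine reaches a
                         `Returned` state, and every state it steps from on the way satisfies `I`   (`ReachVia`)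

  HOW A CONTRACT IS USED. A caller's walk executes the `call` instruction itself (it is an ordinary instruction for the
  stepper: it pushes the return address and sets rip), arrives at a state at the callee's entry, proves `AtEntry` and the
  callee's `pre` there, and continues from an arbitrary `Returned` state: `Calls.use`. `AtEntry` of the callee is built from
  the caller's own `AtEntry` (the code is still there: `Code.In` frame lemmas; the stack budget: arithmetic).

  HOW THE CODE STAYS IN MEMORY. Every contract carries `C.In mem` in and out. Inside a walk it is kept by `Code.In.writeLE`:
  a store whose range does not meet `[C.lo, C.hi)`. That range is known to be elsewhere because every store of the program
  goes to the stack, the data, the arena, the output or the shadow — for a checked store this is part of what "the address is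
  live" means (the live set of Asan/Shadow.lean is chosen disjoint from the code).

  LEFT TO THE WALKER (M3): stepping `call` / `ret` / `push` / `pop`; building `AtEntry` of a callee from the state its stepper
  produces (`AtEntry.mk` with the fields by its frame tactics); proving `Returned` at a `ret` (`RegsKept` and `Mem.SameExcept`
  by the frame vocabulary of X86/Derived/User/Frame.lean, which this file reuses on purpose); recursion (`get_bits`: one level,
  by a measure); indirect calls (the contract of every possible target as a hypothesis).
-/
import UserX.ReachVia
import X86.Derived.User.Frame
namespace X86
namespace User

/-! ### The code of the image -/

/-- The code of a program: the bytes `bytes` at `base`. -/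
structure Code where
  base : Word
  bytes : List Byte

namespace Code

/-- First address of the code. -/
def lo (C : Code) : Nat := C.base.toNat

/-- One past the last address of the code. -/
def hi (C : Code) : Nat := C.base.toNat + C.bytes.length

/-- **The code is in memory.** -/
def In (C : Code) (mem : Mem) : Prop := CodeAt mem C.base C.bytes

/-- The span of the code, for footprints. -/
def span (C : Code) : Span := ⟨C.lo, C.hi⟩

/-- **A store that does not meet the code leaves it in memory.** -/
theorem In.writeLE {C : Code} {mem : Mem} (h : C.In mem) (a : Word) (k x : Nat) (hC : C.hi < 2 ^ 64)
    (ha : a.toNat + k < 2 ^ 64) (hd : a.toNat + k ≤ C.lo ∨ C.hi ≤ a.toNat) : C.In (mem.writeLE a k x) :=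
  CodeAt.writeLE h a k x hC ha hd

/-- The same for a store inside the user region of a layout. -/
theorem In.writeLE_has {L : Layout} {C : Code} {mem : Mem} (h : C.In mem) {a : Word} {k : Nat} (x : Nat)
    (hC : L.Has C.base C.bytes.length) (ha : L.Has a k) (hd : a.toNat + k ≤ C.lo ∨ C.hi ≤ a.toNat) :
    C.In (mem.writeLE a k x) :=
  CodeAt.writeLE_has h x hC ha hd

/-- Memories that agree on the code's addresses. -/
theorem In.eqOn {C : Code} {mem mem' : Mem} (h : C.In mem) (hC : C.hi < 2 ^ 64) (he : Mem.EqOn C.lo C.hi mem mem') :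
    C.In mem' :=
  CodeAt.of_eqOn he h (Nat.le_refl _) (Nat.le_refl _) hC

/-- **A callee whose footprint does not meet the code leaves it in memory.** -/
theorem In.sameExcept {C : Code} {mem mem' : Mem} {ws : List Span} (h : C.In mem) (hC : C.hi < 2 ^ 64)
    (hs : Mem.SameExcept ws mem mem') (hd : ∀ w ∈ ws, C.hi ≤ w.lo ∨ w.hi ≤ C.lo) : C.In mem' :=
  h.eqOn hC (hs.eqOn C.lo C.hi hd)

/-- The bytes of one instruction, for the decode bridge: `len` bytes at offset `off` of the code. -/
theorem In.at {C : Code} {mem : Mem} (h : C.In mem) (rip : Word) (off len : Nat) (ins : List Byte)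
    (h1 : rip = C.base + UInt64.ofNat off) (h2 : off + len ≤ C.bytes.length) (h3 : (C.bytes.drop off).take len = ins) :
    CodeAt mem rip ins :=
  CodeAt.at h rip off len ins h1 h2 h3

/-- **The code span `[lo, lo + len)` AS IT IS IN A REFERENCE MEMORY `m₀`**, as a `Code`: for a program whose code is fixed by
"the memory of the start state" instead of a byte list written out (an image of 100 KB). `(Code.ofMem m₀ lo len).In m` says
exactly `Mem.EqOn lo (lo + len) m₀ m` (`ofMem_in_iff`): the walker's `w_eq` hypothesis IS the `code` field of a callee's
`AtEntry` and of the function's own `Returned`. The list is never evaluated. -/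
def ofMem (m₀ : Mem) (lo len : Nat) : Code :=
  ⟨UInt64.ofNat lo, (List.range len).map (fun i => m₀.read (UInt64.ofNat lo + UInt64.ofNat i))⟩

/-- A number below 2^64 is the value of its word. -/
theorem toNat_ofNat_lt (n : Nat) (h : n < 2 ^ 64) : (UInt64.ofNat n).toNat = n := by
  rw [UInt64.toNat_ofNat']
  exact Nat.mod_eq_of_lt h

theorem ofMem_lo (m₀ : Mem) (lo len : Nat) (h : lo < 2 ^ 64) : (ofMem m₀ lo len).lo = lo := by
  unfold ofMem Code.lo
  exact toNat_ofNat_lt lo h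

theorem ofMem_hi (m₀ : Mem) (lo len : Nat) (h : lo < 2 ^ 64) : (ofMem m₀ lo len).hi = lo + len := by
  unfold ofMem Code.hi
  simp only [List.length_map, List.length_range]
  rw [toNat_ofNat_lt lo h]

/-- Memories that agree with the reference memory on the span hold the code. -/
theorem ofMem_in_of_eqOn {m₀ m : Mem} {lo len : Nat} (hlt : lo + len < 2 ^ 64) (h : Mem.EqOn lo (lo + len) m₀ m) :
    (ofMem m₀ lo len).In m := by
  intro i hi
  unfold ofMem at hi ⊢
  simp only [List.length_map, List.length_range] at hi
  simp only [List.getElem_map, List.getElem_range]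
  have hlo : (UInt64.ofNat lo).toNat = lo := toNat_ofNat_lt lo (by omega)
  have e : (UInt64.ofNat lo + UInt64.ofNat i).toNat = lo + i := by
    rw [toNat_add_ofNat _ _ (by omega), hlo]
  exact h _ (by omega) (by omega)

/-- … and conversely: a memory that holds the code agrees with the reference memory on the span. -/
theorem eqOn_of_ofMem_in {m₀ m : Mem} {lo len : Nat} (hlt : lo + len < 2 ^ 64) (h : (ofMem m₀ lo len).In m) :
    Mem.EqOn lo (lo + len) m₀ m := by
  intro a h1 h2
  have hlo : (UInt64.ofNat lo).toNat = lo := toNat_ofNat_lt lo (by omega)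
  have hi : a.toNat - lo < ((List.range len).map (fun i => m₀.read (UInt64.ofNat lo + UInt64.ofNat i))).length := by
    simp only [List.length_map, List.length_range]
    omega
  have e : UInt64.ofNat lo + UInt64.ofNat (a.toNat - lo) = a := by
    apply UInt64.toNat_inj.mp
    rw [toNat_add_ofNat _ _ (by omega), hlo]
    omega
  have := h (a.toNat - lo) hi
  unfold ofMem at this
  simp only [List.getElem_map, List.getElem_range] at this
  rw [e] at this
  exact this

/-- `(ofMem m₀ lo len).In m ↔ Mem.EqOn lo (lo + len) m₀ m`. -/
theorem ofMem_in_iff {m₀ m : Mem} {lo len : Nat} (hlt : lo + len < 2 ^ 64) :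
    (ofMem m₀ lo len).In m ↔ Mem.EqOn lo (lo + len) m₀ m :=
  ⟨eqOn_of_ofMem_in hlt, ofMem_in_of_eqOn hlt⟩

end Code

/-! ### The calling convention -/

/-- The registers a callee may change: everything but rbx, rbp, r12–r15 (and rsp, whose value on return is stated apart). -/
def callerSaved : List Reg :=
  [.rax, .rcx, .rdx, .rsi, .rdi, .rsp, .r8, .r9, .r10, .r11,
   .r16, .r17, .r18, .r19, .r20, .r21, .r22, .r23, .r24, .r25, .r26, .r27, .r28, .r29, .r30, .r31]

/-- The registers of the first six integer / pointer arguments, in order. -/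
def argRegs : List Reg := [.rdi, .rsi, .rdx, .rcx, .r8, .r9]

namespace State

/-- Integer / pointer argument `i` (0 … 5) of the System V ABI. -/
def arg (u : State) (i : Nat) : Word := u.reg (argRegs.getD i .rdi)

/-- The integer / pointer result. -/
def result (u : State) : Word := u.reg .rax

/-- The low 32 bits of `xmm i`: a `float` argument (i = 0 … 7) or, for i = 0, the `float` result. -/
def xmmFloat (u : State) (i : VReg) : BitVec 32 := (u.zmm[i]).setWidth 32

/-- The low 64 bits of `xmm i`: a `double` argument or result. -/
def xmmDouble (u : State) (i : VReg) : BitVec 64 := (u.zmm[i]).setWidth 64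

/-- The 8-byte word on the stack at `[rsp + 8 * (i + 1)]` of a state at a function's entry: stack argument `i` (the seventh
argument is stack argument 0). -/
def stackArg (u : State) (i : Nat) : Nat := u.mem.readLE (u.reg .rsp + UInt64.ofNat (8 * (i + 1))) 8

@[simp] theorem arg_zero (u : State) : u.arg 0 = u.reg .rdi := id rfl
@[simp] theorem arg_one (u : State) : u.arg 1 = u.reg .rsi := id rfl
@[simp] theorem arg_two (u : State) : u.arg 2 = u.reg .rdx := id rfl
@[simp] theorem arg_three (u : State) : u.arg 3 = u.reg .rcx := id rfl
@[simp] theorem arg_four (u : State) : u.arg 4 = u.reg .r8 := id rfl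
@[simp] theorem arg_five (u : State) : u.arg 5 = u.reg .r9 := id rfl

end State

/-- **What every function of one program shares.** -/
structure Conv where
  /-- the code of the image -/
  code : Code
  /-- the stack region: `[stackLo, stackHi)` -/
  stackLo : Nat
  stackHi : Nat
  /-- the invariant of every function boundary, threaded through every contract: the direction flag is clear (ABI), the SSE
  exceptions are masked (`SseOK`), and whatever else the program keeps everywhere -/
  inv : State → Prop

/-- The ABI's part of `Conv.inv`: the direction flag is clear at every function boundary, and the six SSE exception masks of
MXCSR are set (`User.SseOK` of UserX/SseBase.lean, unfolded; the sticky flag bits 0–5 may be anything). A program's `inv` is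
this and what else it keeps everywhere. -/
def abiInv (u : State) : Prop := u.flags .df = false ∧ u.mxcsr &&& 0x1F80 = 0x1F80

/-- **What is particular to one function.** A ghost parameter of a contract (a live set, an abstract decoder state …) is a
parameter of the `Spec`-valued function; the contract is then stated for all its values. -/
structure Spec where
  /-- the precondition, of the state at the function's first instruction -/
  pre : State → Prop
  /-- the postcondition, of the state at the first instruction and the state after the `ret` -/
  post : State → State → Prop
  /-- the stack bytes the function (with everything it calls) uses below its return address -/
  frame : Nat
  /-- the memory windows it may write, besides those `frame` bytes of stack (they may depend on the arguments) -/
  writes : State → List Span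

/-- **At the first instruction of a called function.** -/
structure AtEntry (K : Conv) (entry : Word) (frame : Nat) (ret : Word) (u : State) : Prop where
  rip : u.rip = entry
  /-- the return address is on top of the stack -/
  retAddr : UInt64.ofNat (u.mem.readLE (u.reg .rsp) 8) = ret
  /-- the return address is canonical for the flat machine (below 1 GB): what executing the function's `ret` needs. Every
  return address of the program is an address of its code -/
  ret_lt : ret < 0x40000000
  /-- the stack pointer is a multiple of 8. (NOT the ABI's "rsp + 8 is a multiple of 16": gcc's `-fipa-stack-alignment` calls a
  function of the same translation unit that needs no 16-byte alignment with the stack 8-aligned only — `sin`, `cos`,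
  `ldexp`, `sincos_quadrant` of libm call with rsp ≡ 0 (mod 16) — and no instruction of the image needs more than 8.) -/
  align : (u.reg .rsp).toNat % 8 = 0
  /-- the stack the function may use, and the slot of its return address, lie in the stack region -/
  room : K.stackLo + frame ≤ (u.reg .rsp).toNat
  top : (u.reg .rsp).toNat + 8 ≤ K.stackHi
  code : K.code.In u.mem
  inv : K.inv u

/-- The memory a function with the spec `s`, entered at `u`, may have written: its stack frame and its declared windows. -/
def Spec.footprint (s : Spec) (u : State) : List Span :=
  ⟨(u.reg .rsp).toNat - s.frame, (u.reg .rsp).toNat⟩ :: s.writes u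

/-- **After the `ret` of a function entered at `u`.** -/
structure Returned (K : Conv) (s : Spec) (u : State) (ret : Word) (v : State) : Prop where
  rip : v.rip = ret
  /-- the return address has been popped -/
  rsp : v.reg .rsp = u.reg .rsp + 8
  /-- rbx, rbp, r12–r15 have the values they had -/
  saved : RegsKept callerSaved u v
  /-- nothing was written outside the function's stack frame and its declared windows -/
  same : Mem.SameExcept (s.footprint u) u.mem v.mem
  code : K.code.In v.mem
  inv : K.inv v
  post : s.post u v

/-- **THE CONTRACT of the function at `entry`**: whenever it is entered with its precondition, it returns — to the address on
the stack, with the ABI's guarantees and its postcondition — and every state the machine steps from on the way is in `I`. -/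
def Calls (L : Layout) (μ : Microarch) (I : State → Prop) (K : Conv) (entry : Word) (s : Spec) : Prop :=
  ∀ (u : State) (ret : Word), AtEntry K entry s.frame ret u → s.pre u → ReachVia L μ I u (Returned K s u ret)

variable {L : Layout} {μ : Microarch} {I : State → Prop} {K : Conv}

/-- **USING a callee's contract inside a caller's walk.** The walk has executed the `call` and stands at `u`, the callee's
entry; it shows `AtEntry` and the precondition, and goes on from an arbitrary returned state. -/
theorem Calls.use {entry : Word} {s : Spec} {P : State → Prop} (hc : Calls L μ I K entry s) {u : State} (ret : Word)
    (he : AtEntry K entry s.frame ret u) (hp : s.pre u) (hk : ∀ v, Returned K s u ret v → ReachVia L μ I v P) :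
    ReachVia L μ I u P :=
  (hc u ret he hp).trans hk

/-- A contract with a weaker precondition, a stronger postcondition, a smaller stack frame and fewer windows implies the
weaker one. (Fewer windows: every window of `s` at `u` lies, byte by byte, in the footprint of `s'`.) -/
theorem Calls.weaken {entry : Word} {s s' : Spec} (hc : Calls L μ I K entry s)
    (hpre : ∀ u, s'.pre u → s.pre u)
    (hpost : ∀ u v, s'.pre u → s.post u v → s'.post u v)
    (hframe : s.frame ≤ s'.frame)
    (hwrites : ∀ u, s'.pre u → ∀ w ∈ s.writes u, ∀ a : Nat, w.lo ≤ a → a < w.hi → ∃ w' ∈ s'.footprint u, w'.lo ≤ a ∧ a < w'.hi) :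
    Calls L μ I K entry s' := by
  intro u ret he hp
  have he' : AtEntry K entry s.frame ret u :=
    ⟨he.rip, he.retAddr, he.ret_lt, he.align, Nat.le_trans (Nat.add_le_add_left hframe _) he.room, he.top, he.code, he.inv⟩
  refine (hc u ret he' (hpre u hp)).mono ?_
  intro v hv
  refine ⟨hv.rip, hv.rsp, hv.saved, ?_, hv.code, hv.inv, hpost u v hp hv.post⟩
  apply hv.same.mono
  intro w hw a h1 h2
  unfold Spec.footprint at hw
  rcases List.mem_cons.mp hw with rfl | hw
  · refine ⟨⟨(u.reg .rsp).toNat - s'.frame, (u.reg .rsp).toNat⟩, ?_, ?_, h2⟩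
    · unfold Spec.footprint
      exact List.mem_cons_self
    · show (u.reg .rsp).toNat - s'.frame ≤ a
      have : (u.reg .rsp).toNat - s.frame ≤ a := h1
      omega
  · exact hwrites u hp w hw a h1 h2

/-- **`Calls.weaken` AT ONE ENTRY STATE** (S2's `GetBits.reuse_at`): a contract `s` for the entry gives the run of a contract `s'`
with a larger frame from the one entry state `u` at which `s`'s precondition holds, provided `s`'s post gives `s'`'s there and
every window of `s` lies in the footprint of `s'`. For a function whose contract is proved in STAGES at its own entry (get_bits:
`spec24` is reused for `spec` when `n ≤ 24`): the walker does not apply a `Calls` hypothesis whose entry is the function's own. -/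
theorem Calls.weaken_at {entry : Word} {s s' : Spec} (hc : Calls L μ I K entry s) {u : State} {ret : Word}
    (he : AtEntry K entry s'.frame ret u) (hframe : s.frame ≤ s'.frame) (hpre : s.pre u)
    (hpost : ∀ v, s.post u v → s'.post u v)
    (hwrites : ∀ w ∈ s.writes u, ∀ a : Nat, w.lo ≤ a → a < w.hi → ∃ w' ∈ s'.footprint u, w'.lo ≤ a ∧ a < w'.hi) :
    ReachVia L μ I u (Returned K s' u ret) := by
  have he' : AtEntry K entry s.frame ret u :=
    ⟨he.rip, he.retAddr, he.ret_lt, he.align, Nat.le_trans (Nat.add_le_add_left hframe _) he.room, he.top, he.code, he.inv⟩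
  refine (hc u ret he' hpre).mono ?_
  intro v hv
  refine ⟨hv.rip, hv.rsp, hv.saved, ?_, hv.code, hv.inv, hpost v hv.post⟩
  apply hv.same.mono
  intro w hw a h1 h2
  unfold Spec.footprint at hw
  rcases List.mem_cons.mp hw with rfl | hw
  · refine ⟨⟨(u.reg .rsp).toNat - s'.frame, (u.reg .rsp).toNat⟩, ?_, ?_, h2⟩
    · unfold Spec.footprint
      exact List.mem_cons_self
    · show (u.reg .rsp).toNat - s'.frame ≤ a
      have : (u.reg .rsp).toNat - s.frame ≤ a := h1
      omega
  · exact hwrites w hw a h1 h2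

/-- A contract for a stronger invariant of the way gives the contract for a weaker one. -/
theorem Calls.weaken_inv {I' : State → Prop} {entry : Word} {s : Spec} (hc : Calls L μ I K entry s)
    (hi : ∀ v, I v → I' v) : Calls L μ I' K entry s :=
  fun u ret he hp => (hc u ret he hp).weaken hi

/-! ### What a caller reads off a `Returned` state -/

namespace Returned
variable {s : Spec} {u v : State} {ret : Word}

/-- A callee-saved register after the call. -/
theorem reg (h : Returned K s u ret v) (r : Reg) (hr : r.isIn callerSaved = false) : v.reg r = u.reg r :=
  h.saved r hr

/-- Memory away from the callee's footprint, after the call: an `n`-byte load. -/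
theorem readLE (h : Returned K s u ret v) (a : Word) (n : Nat) (hn : a.toNat + n < 2 ^ 64)
    (hd : ∀ w ∈ s.footprint u, a.toNat + n ≤ w.lo ∨ w.hi ≤ a.toNat) : v.mem.readLE a n = u.mem.readLE a n :=
  h.same.readLE a n hn hd

/-- A region away from the callee's footprint is unchanged. -/
theorem eqOn (h : Returned K s u ret v) (lo hi : Nat) (hd : ∀ w ∈ s.footprint u, hi ≤ w.lo ∨ w.hi ≤ lo) :
    Mem.EqOn lo hi u.mem v.mem :=
  h.same.eqOn lo hi hd

end Returned

end User
end X86
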